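-- pv_equiv track=rewrite | github.com/rheask8246/EECSC106A-Final-Project | dfs_points.py | dfs_points
-- ===== SOURCE A (Python) =====
-- def dfs_points(grid):
--     """Just takes in a grid and gives back the points in a dfs order such that they can be traversed by the robot"""
--     dfs_trees = []
--     notAllSeen = True
--     while notAllSeen:
--         notAllSeen = False
--         for i in range(len(grid)):
--             for j in range(len(grid[0])):
--                 if grid[i][j] == 1:
--                     notAllSeen = True
--                     listofPointsFromThisDFS = visit(grid, i, j)
--                     dfs_trees.append(listofPointsFromThisDFS)
--     return dfs_trees
--
-- def visit(grid, i, j):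
--     points = [(i, j)]
--     grid[i][j] = 0
--     fourDirections = [(i, j + 1), (i + 1, j), (i - 1, j), (i , j - 1)]
--     for x, y in fourDirections:
--         if x >= len(grid) or x < 0 or y >= len(grid[0]) or y < 0:
--             continue
--         if grid[x][y] == 1:
--             points.extend(visit(grid, x, y))
--             return points
--     return points
-- ===== SOURCE B (Python) =====
-- def dfs_points(grid):
--     """Single forward scan over a set of remaining 1-cells; no grid mutation, no rescanning passes."""
--     n = len(grid)
--     m = len(grid[0]) if grid else 0
--     remaining = {(i, j) for i in range(n) for j in range(m) if grid[i][j] == 1}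
--     trees = []
--     for i in range(n):
--         for j in range(m):
--             if (i, j) in remaining:
--                 chain = []
--                 x, y = i, j
--                 while True:
--                     remaining.discard((x, y))
--                     chain.append((x, y))
--                     for nxt in ((x, y + 1), (x + 1, y), (x - 1, y), (x, y - 1)):
--                         if nxt in remaining:
--                             x, y = nxt
--                             break
--                     else:
--                         break
--                 trees.append(chain)
--     return trees
-- ===== Notes on version B (the rewrite author's own statement) =====
-- stated objective: alternative
-- what changed: A repeatedly rescans the whole grid while mutating it in place and follows chains by recursion; B makes one forward scan over a precomputed set of remaining 1-cells, follows each chain iteratively by set membership, and needs no second verification pass and no grid mutation.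
import Mathlib
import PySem

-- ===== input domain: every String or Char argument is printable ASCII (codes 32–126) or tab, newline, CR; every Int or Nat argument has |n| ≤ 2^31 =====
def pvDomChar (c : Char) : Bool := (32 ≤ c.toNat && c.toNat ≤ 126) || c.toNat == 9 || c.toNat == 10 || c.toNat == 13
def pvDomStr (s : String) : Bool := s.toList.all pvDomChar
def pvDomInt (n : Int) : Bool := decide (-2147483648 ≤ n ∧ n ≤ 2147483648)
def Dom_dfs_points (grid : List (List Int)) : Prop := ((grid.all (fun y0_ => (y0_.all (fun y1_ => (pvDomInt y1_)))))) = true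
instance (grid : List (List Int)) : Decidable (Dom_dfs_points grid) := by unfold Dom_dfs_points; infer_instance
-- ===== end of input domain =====

-- B replaces A's repeated full-grid rescans and in-place mutation by one forward scan over a set of
-- remaining 1-cells (objective: alternative; return values proved equal — A additionally mutates its
-- argument grid in place, B does not).


-- ===== PORT A =====
-- grid[x][y] (read only at call sites where 0 ≤ x < len(grid), 0 ≤ y < len(grid[x]))
def pvGet2 (g : List (List Int)) (x y : Int) : Int := (g.getD x.toNat []).getD y.toNat 0
-- grid[x][y] = 0 (written only where in range)
def pvZero2 (g : List (List Int)) (x y : Int) : List (List Int) :=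
  g.set x.toNat ((g.getD x.toNat []).set y.toNat 0)

-- the 'for x, y in fourDirections' loop of visit: first direction that is in bounds and holds a 1
-- (the loop 'continue's on the rest, and visit returns right after the first hit)
def pvPick (g : List (List Int)) : List (Int × Int) → Option (Int × Int)
  | [] => none
  | (x, y) :: rest =>
    if (g.length : Int) ≤ x ∨ x < 0 ∨ ((g.headD []).length : Int) ≤ y ∨ y < 0 then pvPick g rest
    else if pvGet2 g x y = 1 then some (x, y) else pvPick g rest

-- visit(grid, i, j): returns (points, mutated grid); fuel is a totality guard only (each recursive
-- call zeroes one 1-cell, so fuel = #cells + 1 is never exhausted)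
def pvVisit : Nat → List (List Int) → Int → Int → List (Int × Int) × List (List Int)
  | 0, g, i, j => ([(i, j)], pvZero2 g i j)
  | f+1, g, i, j =>
    let g1 := pvZero2 g i j
    match pvPick g1 [(i, j + 1), (i + 1, j), (i - 1, j), (i, j - 1)] with
    | none => ([(i, j)], g1)
    | some (x, y) =>
      let r := pvVisit f g1 x y
      ((i, j) :: r.1, r.2)

-- inner 'for j in range(len(grid[0]))' of the scan; state = (notAllSeen, grid, dfs_trees)
def pvScanRowA (F : Nat) (i : Int) :
    List Int → Bool × List (List Int) × List (List (Int × Int)) →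
    Bool × List (List Int) × List (List (Int × Int))
  | [], st => st
  | j :: rest, (b, g, trees) =>
    if pvGet2 g i j = 1 then
      let r := pvVisit F g i j
      pvScanRowA F i rest (true, r.2, trees ++ [r.1])
    else pvScanRowA F i rest (b, g, trees)

-- outer 'for i in range(len(grid))'
def pvScanA (F : Nat) :
    List Int → Bool × List (List Int) × List (List (Int × Int)) →
    Bool × List (List Int) × List (List (Int × Int))
  | [], st => st
  | i :: rest, st =>
    pvScanA F rest (pvScanRowA F i (PySem.List.pyRange 0 ((st.2.1.headD []).length : Int) 1) st)

-- 'while notAllSeen'; fuel is a totality guard only (each repeated pass zeroes at least one 1-cell)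
def pvLoopA (F : Nat) : Nat → List (List Int) → List (List (Int × Int)) → List (List (Int × Int))
  | 0, _, trees => trees
  | f+1, g, trees =>
    match pvScanA F (PySem.List.pyRange 0 (g.length : Int) 1) (false, g, trees) with
    | (b, g', trees') => if b then pvLoopA F f g' trees' else trees'

def dfs_points (grid : List (List Int)) : List (List (Int × Int)) :=
  pvLoopA (grid.length * (grid.headD []).length + 1)
          (grid.length * (grid.headD []).length + 2) grid []

-- ===== PORT B =====
-- the set comprehension {(i, j) for i in range(n) for j in range(m) if grid[i][j] == 1}
def pvCells (grid : List (List Int)) : List (Int × Int) :=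
  (PySem.List.pyRange 0 (grid.length : Int) 1).flatMap (fun i =>
    ((PySem.List.pyRange 0 ((grid.headD []).length : Int) 1).filter
        (fun j => pvGet2 grid i j = 1)).map (fun j => (i, j)))

-- the 'while True' chain-follow loop; returns (chain, remaining); fuel = totality guard only
-- (each iteration removes the current cell from remaining)
def pvChain : Nat → PySem.Set (Int × Int) → Int → Int → List (Int × Int) × PySem.Set (Int × Int)
  | 0, rem, x, y => ([], PySem.Set.discard rem (x, y))
  | f+1, rem, x, y =>
    let rem1 := PySem.Set.discard rem (x, y)
    match [(x, y + 1), (x + 1, y), (x - 1, y), (x, y - 1)].find? (fun p => rem1.contains p) with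
    | none => ([(x, y)], rem1)
    | some p =>
      let r := pvChain f rem1 p.1 p.2
      ((x, y) :: r.1, r.2)

-- inner 'for j in range(m)'; state = (remaining, trees)
def pvScanRowB (F : Nat) (i : Int) :
    List Int → PySem.Set (Int × Int) × List (List (Int × Int)) →
    PySem.Set (Int × Int) × List (List (Int × Int))
  | [], st => st
  | j :: rest, (rem, trees) =>
    if rem.contains (i, j) then
      let r := pvChain F rem i j
      pvScanRowB F i rest (r.2, trees ++ [r.1])
    else pvScanRowB F i rest (rem, trees)

-- outer 'for i in range(n)'
def pvScanB (F : Nat) (js : List Int) :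
    List Int → PySem.Set (Int × Int) × List (List (Int × Int)) →
    PySem.Set (Int × Int) × List (List (Int × Int))
  | [], st => st
  | i :: rest, st => pvScanB F js rest (pvScanRowB F i js st)

def dfs_points_alt (grid : List (List Int)) : List (List (Int × Int)) :=
  let n := grid.length
  let m := (grid.headD []).length
  let rem : PySem.Set (Int × Int) := PySem.Set.ofList (pvCells grid)
  (pvScanB (n * m + 1) (PySem.List.pyRange 0 (m : Int) 1)
           (PySem.List.pyRange 0 (n : Int) 1) (rem, [])).2

-- ===== PRECONDITION & SPEC =====
-- A reads grid[i][j] for every i < len(grid), j < len(grid[0]) and raises IndexError iff some row is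
-- shorter than row 0; Pre_ excludes exactly those ragged grids (A returns on everything else).
def Pre_dfs_points (grid : List (List Int)) : Prop :=
  ∀ row ∈ grid, (grid.headD []).length ≤ row.length
instance (grid : List (List Int)) : Decidable (Pre_dfs_points grid) := by
  unfold Pre_dfs_points; infer_instance
def pvWitness_dfs_points : List (List Int) := [[1, 0, 1], [1, 1, 0]]

def Spec_dfs_points (grid : List (List Int)) (out : List (List (Int × Int))) : Prop := out = dfs_points_alt grid
instance (grid : List (List Int)) (out : List (List (Int × Int))) : Decidable (Spec_dfs_points grid out) := by unfold Spec_dfs_points; infer_instance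

-- ===== CLAIM (what is proved, stated in full; the proofs are below) =====
def Claim_equal_dfs_points : Prop := ∀ (grid : List (List Int)), Dom_dfs_points grid → Pre_dfs_points grid → Spec_dfs_points grid (dfs_points grid)

-- ===== LEMMAS AND PROOFS =====

-- the rows of g have the same lengths as those of grid (A only overwrites cells)
def PvShape (grid g : List (List Int)) : Prop := g.map List.length = grid.map List.length

-- p lies in the n × m rectangle the scans cover (n = len(grid), m = len(grid[0]))
def PvInRect (grid : List (List Int)) (p : Int × Int) : Prop :=
  0 ≤ p.1 ∧ p.1 < (grid.length : Int) ∧ 0 ≤ p.2 ∧ p.2 < ((grid.headD []).length : Int)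

-- the coupling invariant: A's mutated grid g and B's remaining set rem describe the same 1-cells
def PvRel (grid g : List (List Int)) (rem : List (Int × Int)) : Prop :=
  PvShape grid g ∧ (∀ p ∈ rem, PvInRect grid p) ∧
  (∀ p : Int × Int, PvInRect grid p → (pvGet2 g p.1 p.2 = 1 ↔ p ∈ rem))


theorem pv_shape_length {grid g : List (List Int)} (h : PvShape grid g) : g.length = grid.length := by
  have h2 := congrArg List.length h
  simpa using h2

theorem pv_shape_head {grid g : List (List Int)} (h : PvShape grid g) :
    (g.headD []).length = (grid.headD []).length := by
  unfold PvShape at h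
  cases g with
  | nil => cases grid with
    | nil => rfl
    | cons b s => simp at h
  | cons a t => cases grid with
    | nil => simp at h
    | cons b s => simp_all

theorem pv_shape_row {grid g : List (List Int)} (h : PvShape grid g) (k : Nat) :
    (g.getD k []).length = (grid.getD k []).length := by
  have h1 : (g.map List.length)[k]? = (grid.map List.length)[k]? := by rw [h]
  rw [List.getElem?_map, List.getElem?_map] at h1
  rw [List.getD_eq_getElem?_getD, List.getD_eq_getElem?_getD]
  cases hg : g[k]? with
  | none => cases hgr : grid[k]? with
    | none => simp
    | some r => rw [hg, hgr] at h1; simp at h1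
  | some r => cases hgr : grid[k]? with
    | none => rw [hg, hgr] at h1; simp at h1
    | some r' => rw [hg, hgr] at h1; simp at h1; simpa using h1

theorem pv_zero2_shape {grid g : List (List Int)} (h : PvShape grid g) (x y : Int) :
    PvShape grid (pvZero2 g x y) := by
  unfold PvShape pvZero2 at *
  rw [List.map_set]
  apply List.ext_getElem?
  intro n
  by_cases hn : n = x.toNat
  · by_cases hx : x.toNat < g.length
    · rw [hn, List.getElem?_set_self (by simpa using hx), ← h, List.getElem?_map,
        List.getElem?_eq_getElem hx]
      simp [List.getD_eq_getElem?_getD, List.getElem?_eq_getElem hx]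
    · rw [List.set_eq_of_length_le (by simpa using Nat.le_of_not_lt hx), ← h]
  · rw [List.getElem?_set_ne (fun hc => hn hc.symm), ← h]

theorem pv_get2_zero2_self {g : List (List Int)} {x y : Int}
    (hx : x.toNat < g.length) (hy : y.toNat < (g.getD x.toNat []).length) :
    pvGet2 (pvZero2 g x y) x y = 0 := by
  have hy' : y.toNat < (g[x.toNat]?.getD []).length := by
    simpa [List.getD_eq_getElem?_getD] using hy
  simp only [pvGet2, pvZero2, List.getD_eq_getElem?_getD]
  rw [List.getElem?_set_self (by simpa using hx)]
  simp only [Option.getD_some]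
  rw [List.getElem?_set_self hy']
  rfl

theorem pv_get2_zero2_ne {g : List (List Int)} {x y u v : Int}
    (h : u.toNat ≠ x.toNat ∨ v.toNat ≠ y.toNat) :
    pvGet2 (pvZero2 g x y) u v = pvGet2 g u v := by
  simp only [pvGet2, pvZero2, List.getD_eq_getElem?_getD]
  by_cases hu : u.toNat = x.toNat
  · have hv : v.toNat ≠ y.toNat := by tauto
    by_cases hx : x.toNat < g.length
    · rw [hu, List.getElem?_set_self (by simpa using hx)]
      simp only [Option.getD_some]
      rw [List.getElem?_set_ne (fun hc => hv hc.symm)]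
    · rw [List.set_eq_of_length_le (by simpa using Nat.le_of_not_lt hx)]
  · rw [List.getElem?_set_ne (i := x.toNat) (fun hc => hu hc.symm)]

theorem pv_row_ge {grid g : List (List Int)} (hpre : Pre_dfs_points grid) (h : PvShape grid g)
    {x : Int} (hx0 : 0 ≤ x) (hx : x < (grid.length : Int)) :
    (grid.headD []).length ≤ (g.getD x.toNat []).length := by
  rw [pv_shape_row h]
  have hxn : x.toNat < grid.length := by omega
  have hmem : grid.getD x.toNat [] ∈ grid := by
    rw [List.getD_eq_getElem?_getD, List.getElem?_eq_getElem hxn]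
    exact List.getElem_mem hxn
  exact hpre _ hmem

theorem pv_rel_zero2 {grid g : List (List Int)} {rem : List (Int × Int)}
    (hpre : Pre_dfs_points grid) (hrel : PvRel grid g rem) {p : Int × Int}
    (hp : PvInRect grid p) :
    PvRel grid (pvZero2 g p.1 p.2) (PySem.Set.discard rem p) := by
  obtain ⟨hsh, hmem, hiff⟩ := hrel
  obtain ⟨h1, h2, h3, h4⟩ := hp
  have hx : p.1.toNat < g.length := by
    have := pv_shape_length hsh; omega
  have hy : p.2.toNat < (g.getD p.1.toNat []).length := by
    have := pv_row_ge hpre hsh h1 h2; omega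
  refine ⟨pv_zero2_shape hsh _ _, ?_, ?_⟩
  · intro q hq
    exact hmem q ((PySem.Set.mem_discard rem p q).1 hq).1
  · intro q hq
    by_cases hqp : q = p
    · subst hqp
      rw [pv_get2_zero2_self hx hy]
      constructor
      · intro hc; exact absurd hc (by norm_num)
      · intro hc; exact absurd ((PySem.Set.mem_discard rem q q).1 hc).2 (by simp)
    · have hq1 : 0 ≤ q.1 ∧ 0 ≤ q.2 := ⟨hq.1, hq.2.2.1⟩
      have hne : q.1.toNat ≠ p.1.toNat ∨ q.2.toNat ≠ p.2.toNat := by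
        have : q.1 ≠ p.1 ∨ q.2 ≠ p.2 := by
          by_contra hc
          push Not at hc
          exact hqp (Prod.ext hc.1 hc.2)
        rcases this with h | h
        · left; omega
        · right; omega
      rw [pv_get2_zero2_ne hne, hiff q hq, PySem.Set.mem_discard]
      constructor
      · intro hm; exact ⟨hm, hqp⟩
      · intro hm; exact hm.1

theorem pv_pick_eq_find {grid g : List (List Int)} {rem : List (Int × Int)}
    (hrel : PvRel grid g rem) :
    ∀ dirs : List (Int × Int), pvPick g dirs = dirs.find? (fun q => PySem.Set.contains rem q) := by
  intro dirs
  induction dirs with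
  | nil => rfl
  | cons d rest ih =>
    obtain ⟨x, y⟩ := d
    have hlen := pv_shape_length hrel.1
    have hhead := pv_shape_head hrel.1
    unfold pvPick
    by_cases hb : (g.length : Int) ≤ x ∨ x < 0 ∨ ((g.headD []).length : Int) ≤ y ∨ y < 0
    · rw [if_pos hb]
      have hnm : PySem.Set.contains rem (x, y) = false := by
        by_contra hc
        have hm : (x, y) ∈ rem := (PySem.Set.contains_iff rem (x, y)).1 (by
          cases hco : PySem.Set.contains rem (x, y)
          · exact absurd hco hc
          · rfl)
        have := hrel.2.1 (x, y) hm
        obtain ⟨e1, e2, e3, e4⟩ := this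
        simp only at e1 e2 e3 e4
        omega
      rw [List.find?_cons, hnm, ih]
    · rw [if_neg hb]
      push Not at hb
      have hrect : PvInRect grid (x, y) := by
        refine ⟨hb.2.1, by omega, hb.2.2.2, by omega⟩
      have hiff := hrel.2.2 (x, y) hrect
      by_cases h1 : pvGet2 g x y = 1
      · rw [if_pos h1]
        have hc : PySem.Set.contains rem (x, y) = true :=
          (PySem.Set.contains_iff rem (x, y)).2 (hiff.1 h1)
        rw [List.find?_cons, hc]
      · rw [if_neg h1]
        have hc : PySem.Set.contains rem (x, y) = false := by
          cases hco : PySem.Set.contains rem (x, y)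
          · rfl
          · exact absurd (hiff.2 ((PySem.Set.contains_iff rem (x, y)).1 hco)) h1
        rw [List.find?_cons, hc, ih]

theorem pv_subset_length {s l : List (Int × Int)} (hn : s.Nodup) (hsub : s ⊆ l) :
    s.length ≤ l.length :=
  (List.Nodup.subperm hn hsub).length_le

theorem pv_discard_length {rem : List (Int × Int)} {p : Int × Int}
    (hn : rem.Nodup) (hp : p ∈ rem) :
    (PySem.Set.discard rem p).length < rem.length := by
  have hsub : PySem.Set.discard rem p ⊆ rem.erase p := by
    intro q hq
    have h2 := (PySem.Set.mem_discard rem p q).1 hq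
    exact (List.Nodup.mem_erase_iff hn).2 ⟨h2.2, h2.1⟩
  have h3 := pv_subset_length (PySem.Set.nodup_discard rem p hn) hsub
  have h4 := List.length_erase_of_mem hp
  have h5 := List.length_pos_of_mem hp
  omega

theorem pv_visit_sim {grid : List (List Int)} (hpre : Pre_dfs_points grid) :
    ∀ (f : Nat) (g : List (List Int)) (rem : List (Int × Int)) (p : Int × Int),
      PvRel grid g rem → rem.Nodup → p ∈ rem → rem.length ≤ f →
      (pvVisit f g p.1 p.2).1 = (pvChain f rem p.1 p.2).1 ∧
      PvRel grid (pvVisit f g p.1 p.2).2 (pvChain f rem p.1 p.2).2 ∧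
      (pvChain f rem p.1 p.2).2.Nodup ∧
      (∀ q ∈ (pvChain f rem p.1 p.2).2, q ∈ rem ∧ q ≠ p) := by
  intro f
  induction f with
  | zero =>
    intro g rem p _ _ hp hlen
    rw [List.length_eq_zero_iff.1 (Nat.le_zero.1 hlen)] at hp
    exact absurd hp (List.not_mem_nil)
  | succ f ih =>
    intro g rem p hrel hnd hp hlen
    have hrect := hrel.2.1 p hp
    have hrel1 := pv_rel_zero2 hpre hrel hrect
    have hnd1 := PySem.Set.nodup_discard rem p hnd
    have hdl := pv_discard_length hnd hp
    simp only [pvVisit, pvChain]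
    rw [pv_pick_eq_find hrel1]
    have hpe : ((p.1, p.2) : Int × Int) = p := rfl
    rw [hpe]
    cases hfind : [(p.1, p.2 + 1), (p.1 + 1, p.2), (p.1 - 1, p.2), (p.1, p.2 - 1)].find?
        (fun q => PySem.Set.contains (PySem.Set.discard rem p) q) with
    | none =>
      refine ⟨rfl, hrel1, hnd1, ?_⟩
      intro q hq
      have := (PySem.Set.mem_discard rem p q).1 hq
      exact ⟨this.1, this.2⟩
    | some q =>
      obtain ⟨x, y⟩ := q
      have hqm : (x, y) ∈ PySem.Set.discard rem p := by
        have h1 := List.find?_some hfind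
        exact (PySem.Set.contains_iff _ _).1 (by simpa using h1)
      have ihr := ih (pvZero2 g p.1 p.2) (PySem.Set.discard rem p) (x, y) hrel1 hnd1 hqm
        (by omega)
      simp only at ihr
      refine ⟨?_, ihr.2.1, ihr.2.2.1, ?_⟩
      · show p :: (pvVisit f (pvZero2 g p.1 p.2) x y).1
            = p :: (pvChain f (PySem.Set.discard rem p) x y).1
        rw [ihr.1]
      · intro q hq
        have h2 := ihr.2.2.2 q hq
        have h3 := (PySem.Set.mem_discard rem p q).1 h2.1
        exact ⟨h3.1, h3.2⟩

theorem pv_scanRow_sim {grid : List (List Int)} (hpre : Pre_dfs_points grid) (F : Nat) (i : Int) :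
    ∀ (js : List Int) (b : Bool) (g : List (List Int)) (rem : List (Int × Int))
      (trees : List (List (Int × Int))),
      PvRel grid g rem → rem.Nodup → rem.length < F →
      (∀ j ∈ js, PvInRect grid (i, j)) →
      ∃ b' g',
        pvScanRowA F i js (b, g, trees) = (b', g', (pvScanRowB F i js (rem, trees)).2) ∧
        PvRel grid g' (pvScanRowB F i js (rem, trees)).1 ∧
        (pvScanRowB F i js (rem, trees)).1.Nodup ∧
        (∀ q ∈ (pvScanRowB F i js (rem, trees)).1, q ∈ rem) ∧
        (∀ j ∈ js, (i, j) ∉ (pvScanRowB F i js (rem, trees)).1) := by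
  intro js
  induction js with
  | nil =>
    intro b g rem trees hrel hnd _ _
    exact ⟨b, g, rfl, hrel, hnd, fun q h => h, by simp⟩
  | cons j rest ih =>
    intro b g rem trees hrel hnd hlen hjs
    have hrect : PvInRect grid (i, j) := hjs j (List.mem_cons_self)
    have hiff := hrel.2.2 (i, j) hrect
    simp only [pvScanRowA, pvScanRowB]
    by_cases h1 : pvGet2 g i j = 1
    · have hmem : (i, j) ∈ rem := hiff.1 h1
      have hcont : PySem.Set.contains rem (i, j) = true :=
        (PySem.Set.contains_iff rem (i, j)).2 hmem
      rw [if_pos h1, if_pos hcont]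
      have hv := pv_visit_sim hpre F g rem (i, j) hrel hnd hmem (Nat.le_of_lt hlen)
      simp only at hv
      obtain ⟨hv1, hv2, hv3, hv4⟩ := hv
      have hsub2 : (pvChain F rem i j).2 ⊆ rem := fun q hq => (hv4 q hq).1
      have hlen2 : (pvChain F rem i j).2.length < F :=
        Nat.lt_of_le_of_lt (pv_subset_length hv3 hsub2) hlen
      have ihr := ih true (pvVisit F g i j).2 (pvChain F rem i j).2
        (trees ++ [(pvChain F rem i j).1]) hv2 hv3 hlen2
        (fun j' hj' => hjs j' (List.mem_cons_of_mem _ hj'))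
      obtain ⟨b', g', heq, hrel', hnd', hsub', habs'⟩ := ihr
      refine ⟨b', g', by rw [hv1]; exact heq, hrel', hnd',
        fun q hq => hsub2 (hsub' q hq), ?_⟩
      intro j' hj'
      rcases List.mem_cons.1 hj' with h | h
      · subst h
        intro hc
        exact (hv4 _ (hsub' _ hc)).2 rfl
      · exact habs' j' h
    · have hcont : ¬ (PySem.Set.contains rem (i, j) = true) := fun hco =>
        absurd (hiff.2 ((PySem.Set.contains_iff rem (i, j)).1 hco)) h1
      rw [if_neg h1, if_neg hcont]
      have ihr := ih b g rem trees hrel hnd hlen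
        (fun j' hj' => hjs j' (List.mem_cons_of_mem _ hj'))
      obtain ⟨b', g', heq, hrel', hnd', hsub', habs'⟩ := ihr
      refine ⟨b', g', heq, hrel', hnd', hsub', ?_⟩
      intro j' hj'
      rcases List.mem_cons.1 hj' with h | h
      · subst h
        intro hc
        have : (i, j') ∈ rem := hsub' _ hc
        exact h1 (hiff.2 this)
      · exact habs' j' h

theorem pv_scan_sim {grid : List (List Int)} (hpre : Pre_dfs_points grid) (F : Nat) :
    ∀ (is : List Int) (b : Bool) (g : List (List Int)) (rem : List (Int × Int))
      (trees : List (List (Int × Int))),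
      PvRel grid g rem → rem.Nodup → rem.length < F →
      (∀ i ∈ is, 0 ≤ i ∧ i < (grid.length : Int)) →
      ∃ b' g',
        pvScanA F is (b, g, trees) =
          (b', g', (pvScanB F (PySem.List.pyRange 0 ((grid.headD []).length : Int) 1) is
            (rem, trees)).2) ∧
        PvRel grid g'
          (pvScanB F (PySem.List.pyRange 0 ((grid.headD []).length : Int) 1) is (rem, trees)).1 ∧
        (pvScanB F (PySem.List.pyRange 0 ((grid.headD []).length : Int) 1) is (rem, trees)).1.Nodup ∧
        (∀ q ∈ (pvScanB F (PySem.List.pyRange 0 ((grid.headD []).length : Int) 1) is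
            (rem, trees)).1, q ∈ rem) ∧
        (∀ i ∈ is, ∀ j : Int, 0 ≤ j → j < ((grid.headD []).length : Int) →
          (i, j) ∉ (pvScanB F (PySem.List.pyRange 0 ((grid.headD []).length : Int) 1) is
            (rem, trees)).1) := by
  intro is
  induction is with
  | nil =>
    intro b g rem trees hrel hnd _ _
    exact ⟨b, g, rfl, hrel, hnd, fun q h => h, by simp⟩
  | cons i rest ih =>
    intro b g rem trees hrel hnd hlen his
    have hi := his i (List.mem_cons_self)
    simp only [pvScanA, pvScanB]
    have hhead : ((g.headD []).length : Int) = ((grid.headD []).length : Int) := by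
      rw [pv_shape_head hrel.1]
    rw [hhead]
    have hrow := pv_scanRow_sim hpre F i (PySem.List.pyRange 0 ((grid.headD []).length : Int) 1)
      b g rem trees hrel hnd hlen
      (by
        intro j hj
        rw [PySem.List.mem_pyRange_one] at hj
        exact ⟨hi.1, hi.2, hj.1, hj.2⟩)
    obtain ⟨b1, g1, heq1, hrel1, hnd1, hsub1, habs1⟩ := hrow
    rcases hrowB : pvScanRowB F i (PySem.List.pyRange 0 ((grid.headD []).length : Int) 1)
        (rem, trees) with ⟨rem1, trees1⟩
    rw [hrowB] at heq1 hrel1 hnd1 hsub1 habs1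
    simp only at heq1 hrel1 hnd1 hsub1 habs1
    rw [heq1]
    have hlen1 : rem1.length < F :=
      Nat.lt_of_le_of_lt (pv_subset_length hnd1 hsub1) hlen
    have ihr := ih b1 g1 rem1 trees1 hrel1 hnd1 hlen1
      (fun i' hi' => his i' (List.mem_cons_of_mem _ hi'))
    obtain ⟨b', g', heq, hrel', hnd', hsub', habs'⟩ := ihr
    refine ⟨b', g', heq, hrel', hnd', fun q hq => hsub1 _ (hsub' q hq), ?_⟩
    intro i' hi' j hj0 hjm
    rcases List.mem_cons.1 hi' with h | h
    · subst h
      intro hc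
      exact habs1 j (by rw [PySem.List.mem_pyRange_one]; exact ⟨hj0, hjm⟩) (hsub' _ hc)
    · exact habs' i' h j hj0 hjm

theorem pv_scanRow_noop (F : Nat) (i : Int) :
    ∀ (js : List Int) (b : Bool) (g : List (List Int)) (trees : List (List (Int × Int))),
      (∀ j ∈ js, pvGet2 g i j ≠ 1) → pvScanRowA F i js (b, g, trees) = (b, g, trees) := by
  intro js
  induction js with
  | nil => intro b g trees _; rfl
  | cons j rest ih =>
    intro b g trees h
    simp only [pvScanRowA]
    rw [if_neg (h j (List.mem_cons_self))]
    exact ih b g trees (fun j' hj' => h j' (List.mem_cons_of_mem _ hj'))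

theorem pv_scan_noop (F : Nat) :
    ∀ (is : List Int) (b : Bool) (g : List (List Int)) (trees : List (List (Int × Int))),
      (∀ i ∈ is, ∀ j ∈ PySem.List.pyRange 0 ((g.headD []).length : Int) 1, pvGet2 g i j ≠ 1) →
      pvScanA F is (b, g, trees) = (b, g, trees) := by
  intro is
  induction is with
  | nil => intro b g trees _; rfl
  | cons i rest ih =>
    intro b g trees h
    simp only [pvScanA]
    rw [pv_scanRow_noop F i _ b g trees (h i (List.mem_cons_self))]
    exact ih b g trees (fun i' hi' => h i' (List.mem_cons_of_mem _ hi'))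

theorem pv_mem_cells {grid : List (List Int)} (p : Int × Int) :
    p ∈ pvCells grid ↔ PvInRect grid p ∧ pvGet2 grid p.1 p.2 = 1 := by
  obtain ⟨x, y⟩ := p
  unfold pvCells PvInRect
  simp only [List.mem_flatMap, List.mem_map, List.mem_filter, PySem.List.mem_pyRange_one]
  constructor
  · rintro ⟨i, ⟨hi0, hin⟩, j, ⟨⟨hj0, hjm⟩, hg⟩, hpe⟩
    obtain ⟨rfl, rfl⟩ := Prod.mk.injEq .. ▸ (Prod.mk.inj hpe.symm)
    exact ⟨⟨hi0, hin, hj0, hjm⟩, by simpa using hg⟩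
  · rintro ⟨⟨h1, h2, h3, h4⟩, hg⟩
    exact ⟨x, ⟨h1, h2⟩, y, ⟨⟨h3, h4⟩, by simpa using hg⟩, rfl⟩

theorem pv_cells_length {grid : List (List Int)} :
    (pvCells grid).length ≤ grid.length * (grid.headD []).length := by
  unfold pvCells
  rw [List.length_flatMap]
  have hb : ∀ x ∈ (PySem.List.pyRange 0 (grid.length : Int) 1).map (fun i =>
      (((PySem.List.pyRange 0 ((grid.headD []).length : Int) 1).filter
        (fun j => pvGet2 grid i j = 1)).map (fun j => (i, j))).length),
      x ≤ (grid.headD []).length := by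
    intro x hx
    obtain ⟨i, _, rfl⟩ := List.mem_map.1 hx
    calc _ ≤ (PySem.List.pyRange 0 ((grid.headD []).length : Int) 1).length := by
              rw [List.length_map]; exact List.length_filter_le _ _
      _ = (grid.headD []).length := by rw [PySem.List.length_pyRange_one]; omega
  calc _ ≤ _ := List.sum_le_card_nsmul _ _ hb
    _ ≤ grid.length * (grid.headD []).length := by
        rw [List.length_map, PySem.List.length_pyRange_one]
        simp [smul_eq_mul]

theorem pv_rel_init {grid : List (List Int)} :
    PvRel grid grid (PySem.Set.ofList (pvCells grid)) := by
  refine ⟨rfl, ?_, ?_⟩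
  · intro p hp
    exact ((pv_mem_cells p).1 ((PySem.Set.mem_ofList _ _).1 hp)).1
  · intro p hp
    rw [PySem.Set.mem_ofList, pv_mem_cells]
    constructor
    · intro h1; exact ⟨hp, h1⟩
    · intro h1; exact h1.2


-- ===== VERDICT (by name: the statement is the Claim_ definition above) =====
theorem dfs_points_spec : Claim_equal_dfs_points := by
  intro grid _ hpre
  unfold Spec_dfs_points dfs_points dfs_points_alt
  have eLoop : ∀ (F f : Nat) (g : List (List Int)) (trees : List (List (Int × Int))),
      pvLoopA F (f + 1) g trees =
        (match pvScanA F (PySem.List.pyRange 0 (g.length : Int) 1) (false, g, trees) with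
         | (b, g', trees') => if b then pvLoopA F f g' trees' else trees') :=
    fun _ _ _ _ => rfl
  have hlen0 : (PySem.Set.ofList (pvCells grid)).length <
      grid.length * (grid.headD []).length + 1 :=
    Nat.lt_succ_of_le (le_trans (PySem.Set.length_ofList_le _) pv_cells_length)
  obtain ⟨b', g', heq, hrel', hnd', hsub', habs'⟩ :=
    pv_scan_sim hpre (grid.length * (grid.headD []).length + 1)
      (PySem.List.pyRange 0 (grid.length : Int) 1) false grid
      (PySem.Set.ofList (pvCells grid)) [] pv_rel_init (PySem.Set.nodup_ofList _) hlen0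
      (fun i hi => (PySem.List.mem_pyRange_one).1 hi)
  show pvLoopA (grid.length * (grid.headD []).length + 1)
      ((grid.length * (grid.headD []).length + 1) + 1) grid [] = _
  rw [eLoop, heq]
  have hgl : ((g'.length : Int)) = (grid.length : Int) := by
    rw [pv_shape_length hrel'.1]
  have hgh : (((g'.headD []).length : Int)) = ((grid.headD []).length : Int) := by
    rw [pv_shape_head hrel'.1]
  have hnoopHyp : ∀ i ∈ PySem.List.pyRange 0 ((g'.length : Int)) 1,
      ∀ j ∈ PySem.List.pyRange 0 (((g'.headD []).length : Int)) 1, pvGet2 g' i j ≠ 1 := by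
    intro i hi j hj h1
    rw [hgl] at hi
    rw [hgh] at hj
    rw [PySem.List.mem_pyRange_one] at hi hj
    have hrect : PvInRect grid (i, j) := ⟨hi.1, hi.2, hj.1, hj.2⟩
    have hm := (hrel'.2.2 (i, j) hrect).1 h1
    exact habs' i (by rw [PySem.List.mem_pyRange_one]; exact hi) j hj.1 hj.2 hm
  cases b' with
  | false => rfl
  | true =>
    show pvLoopA (grid.length * (grid.headD []).length + 1)
        ((grid.length * (grid.headD []).length) + 1) _ _ = _
    rw [eLoop]
    rw [pv_scan_noop (grid.length * (grid.headD []).length + 1)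
      (PySem.List.pyRange 0 (g'.length : Int) 1) false g' _ hnoopHyp]
    rfl
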